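-- pv_equiv track=rewrite | github.com/avanturer/eml-gam | scripts/symbolic_lemma_check.py | sinh_taylor_modp
-- ===== SOURCE A (Python) =====
-- P = (1 << 31) - 1  # Mersenne prime 2^31 - 1
--
-- def _modinv(a: int, p: int = P) -> int:
--     return pow(a, p - 2, p)
--
-- def sinh_taylor_modp(N: int, p: int = P) -> list[int]:
--     out = [0] * (N + 1)
--     fact = 1
--     for k in range(1, N + 1):
--         fact = (fact * k) % p
--         if k % 2 == 1:
--             out[k] = _modinv(fact, p)
--     return out
-- ===== SOURCE B (Python) =====
-- P = (1 << 31) - 1  # Mersenne prime 2^31 - 1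
--
-- def sinh_taylor_modp(N: int, p: int = P) -> list[int]:
--     out = [0] * (N + 1)
--     if N >= 1:
--         out[1] = 1
--     inv_fact = 1
--     for k in range(3, N + 1, 2):
--         inv_fact = inv_fact * pow(k * (k - 1), p - 2, p) % p
--         out[k] = inv_fact
--     return out
-- ===== Notes on version B (the rewrite author's own statement) =====
-- stated objective: alternative
-- what changed: B never maintains the factorial: it walks only the odd indices (range step 2) and accumulates the inverse factorial directly, folding each adjacent pair k*(k-1) into a single modular inverse, instead of A's per-index factorial accumulator inverted from scratch at every odd k.
-- outside the precondition, e.g. on sinh_taylor_modp(2, -4): A returns [0, -3, 0], B returns [0, 1, 0]; on sinh_taylor_modp(1, 1): A returns [0, 0], B returns [0, 1]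
import Mathlib
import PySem

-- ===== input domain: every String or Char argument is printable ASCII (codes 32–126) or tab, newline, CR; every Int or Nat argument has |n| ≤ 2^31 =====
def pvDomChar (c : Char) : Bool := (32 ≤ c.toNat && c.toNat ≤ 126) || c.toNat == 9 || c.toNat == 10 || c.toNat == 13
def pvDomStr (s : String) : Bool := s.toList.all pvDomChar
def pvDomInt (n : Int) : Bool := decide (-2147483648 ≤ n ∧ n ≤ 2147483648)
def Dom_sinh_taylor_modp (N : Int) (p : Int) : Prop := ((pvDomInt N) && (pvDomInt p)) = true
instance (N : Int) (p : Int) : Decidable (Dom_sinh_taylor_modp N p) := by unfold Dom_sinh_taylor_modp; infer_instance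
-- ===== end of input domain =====

-- B replaces A's per-index factorial accumulator (inverted from scratch at every odd k) by a loop over
-- the odd indices only that accumulates the inverse factorial directly, one modular inverse per pair k*(k-1);
-- objective: alternative decomposition of the same O(N log p) work.

-- ===== PORT A =====
-- port of _modinv; exact for p ≥ 2 (under Pre_ the exponent p-2 is nonnegative)
def pvModinv (a : Int) (p : Int) : Int := PySem.Int.powMod a (p - 2).toNat p

def sinh_taylor_modp (N : Int) (p : Int) : List Int :=
  ((PySem.List.pyRange 1 (N + 1) 1).foldl
    (fun (st : List Int × Int) k =>
      let fact := PySem.Int.mod (st.2 * k) p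
      if PySem.Int.mod k 2 = 1 then (PySem.List.pySetD st.1 k (pvModinv fact p), fact)
      else (st.1, fact))
    (PySem.List.pyRepeat [0] (N + 1), 1)).1

-- ===== PORT B =====
def sinh_taylor_modp_alt (N : Int) (p : Int) : List Int :=
  let out0 := PySem.List.pyRepeat [(0 : Int)] (N + 1)
  let out1 := if 1 ≤ N then PySem.List.pySetD out0 1 1 else out0
  ((PySem.List.pyRange 3 (N + 1) 2).foldl
    (fun (st : List Int × Int) k =>
      let inv := PySem.Int.mod (st.2 * PySem.Int.powMod (k * (k - 1)) (p - 2).toNat p) p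
      (PySem.List.pySetD st.1 k inv, inv))
    (out1, 1)).1

-- ===== PRECONDITION & SPEC =====
-- Pre_ restricts to the natural domain of a modulus, p ≥ 2.  For p < 2 the exponent p-2 is negative:
-- Python's pow then raises on p = 0 and on non-coprime bases (which B reaches at even k but A never
-- does), and for p = 1 or p < 0 the "inverses mod p" that do come back are meaningless for the
-- function's purpose and A's and B's values legitimately disagree.
def Pre_sinh_taylor_modp (N : Int) (p : Int) : Prop := 2 ≤ p
instance (N : Int) (p : Int) : Decidable (Pre_sinh_taylor_modp N p) := by unfold Pre_sinh_taylor_modp; infer_instance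
def pvWitness_sinh_taylor_modp : Int × Int := (5, 7)
def Spec_sinh_taylor_modp (N : Int) (p : Int) (out : List Int) : Prop := out = sinh_taylor_modp_alt N p
instance (N : Int) (p : Int) (out : List Int) : Decidable (Spec_sinh_taylor_modp N p out) := by unfold Spec_sinh_taylor_modp; infer_instance

-- ===== CLAIM (what is proved, stated in full; the proofs are below) =====
def Claim_equal_sinh_taylor_modp : Prop := ∀ (N : Int) (p : Int), Dom_sinh_taylor_modp N p → Pre_sinh_taylor_modp N p → Spec_sinh_taylor_modp N p (sinh_taylor_modp N p)

-- ===== LEMMAS AND PROOFS =====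

-- reference shape: entry k is (k!)^(p-2) mod p at odd k ≤ m, else 0
def pvOut (p : Int) (L m : Nat) : List Int :=
  (List.range L).map (fun k => if k % 2 = 1 ∧ k ≤ m then ((Nat.factorial k : Int)) ^ (p - 2).toNat % p else 0)

lemma pvPowEmod (a : Int) (e : Nat) (p : Int) : (a % p) ^ e % p = a ^ e % p := by
  induction e with
  | zero => simp
  | succ n ih => rw [pow_succ, pow_succ, Int.mul_emod, ih, Int.emod_emod_of_dvd a dvd_rfl, ← Int.mul_emod]

lemma pvChain (p x y : Int) (e : Nat) : (x ^ e % p) * (y ^ e % p) % p = (x * y) ^ e % p := by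
  rw [← Int.mul_emod, ← mul_pow]

lemma pvOut_zero (p : Int) (L : Nat) : pvOut p L 0 = List.replicate L 0 := by
  rw [List.eq_replicate_iff]
  refine ⟨by simp [pvOut], ?_⟩
  intro b hb
  simp only [pvOut, List.mem_map, List.mem_range] at hb
  obtain ⟨k, -, hk⟩ := hb
  rw [← hk]
  split_ifs with h
  · omega
  · rfl

lemma pvOut_one (p : Int) (L : Nat) (hp : 2 ≤ p) :
    (List.replicate L (0 : Int)).set 1 1 = pvOut p L 1 := by
  apply List.ext_getElem
  · simp [pvOut]
  · intro i h1 h2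
    simp only [pvOut, List.getElem_set, List.getElem_replicate, List.getElem_map, List.getElem_range]
    by_cases hi : 1 = i
    · subst hi
      rw [Nat.factorial_one, Nat.cast_one, one_pow, Int.emod_eq_of_lt (by norm_num) (by omega)]
      simp
    · rw [if_neg hi, if_neg (by omega)]

lemma pvOut_even (p : Int) (L m : Nat) (h : (m + 1) % 2 = 0) : pvOut p L (m + 1) = pvOut p L m := by
  unfold pvOut
  apply List.map_congr_left
  intro k hk
  by_cases h1 : k % 2 = 1 ∧ k ≤ m
  · rw [if_pos (show k % 2 = 1 ∧ k ≤ m + 1 from ⟨h1.1, by omega⟩), if_pos h1]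
  · rw [if_neg (show ¬(k % 2 = 1 ∧ k ≤ m + 1) from by omega), if_neg h1]

lemma pvOut_set_odd (p : Int) (L m : Nat) (hodd : (m + 1) % 2 = 1) :
    (pvOut p L m).set (m + 1) ((Nat.factorial (m + 1) : Int) ^ (p - 2).toNat % p) = pvOut p L (m + 1) := by
  apply List.ext_getElem
  · simp [pvOut]
  · intro i h1 h2
    simp only [pvOut, List.getElem_set, List.getElem_map, List.getElem_range]
    by_cases hi : m + 1 = i
    · subst hi
      rw [if_pos rfl, if_pos ⟨hodd, le_refl _⟩]
    · rw [if_neg hi]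
      by_cases h3 : i % 2 = 1 ∧ i ≤ m
      · rw [if_pos h3, if_pos (show i % 2 = 1 ∧ i ≤ m + 1 from ⟨h3.1, by omega⟩)]
      · rw [if_neg h3, if_neg (show ¬(i % 2 = 1 ∧ i ≤ m + 1) from by omega)]

lemma pvAloop (p : Int) (hp : 2 ≤ p) (L m : Nat) (hm : m < L) :
    ((PySem.List.pyRange 1 ((m : Int) + 1) 1).foldl
      (fun (st : List Int × Int) k =>
        let fact := PySem.Int.mod (st.2 * k) p
        if PySem.Int.mod k 2 = 1 then (PySem.List.pySetD st.1 k (pvModinv fact p), fact)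
        else (st.1, fact))
      (List.replicate L 0, 1))
    = (pvOut p L m, (Nat.factorial m : Int) % p) := by
  induction m with
  | zero =>
    rw [show ((0 : Nat) : Int) + 1 = 1 by norm_num, PySem.List.pyRange_one_eq_nil le_rfl]
    rw [List.foldl_nil, pvOut_zero, Nat.factorial_zero, Nat.cast_one,
      Int.emod_eq_of_lt (by norm_num) (by omega)]
  | succ m ih =>
    have hcast : ((m + 1 : Nat) : Int) + 1 = ((m : Int) + 1) + 1 := by push_cast; ring
    rw [hcast, PySem.List.pyRange_one_succ_right (by omega), List.foldl_append, ih (by omega),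
      List.foldl_cons, List.foldl_nil]
    have hfact : PySem.Int.mod ((Nat.factorial m : Int) % p * ((m : Int) + 1)) p
        = (Nat.factorial (m + 1) : Int) % p := by
      rw [PySem.Int.mod_eq_emod_of_pos (by omega), Int.mul_emod, Int.emod_emod_of_dvd _ dvd_rfl,
        ← Int.mul_emod]
      congr 1
      rw [Nat.factorial_succ]
      push_cast; ring
    have hmod2 : PySem.Int.mod ((m : Int) + 1) 2 = (((m + 1) % 2 : Nat) : Int) := by
      rw [PySem.Int.mod_eq_emod_of_pos (by norm_num)]
      push_cast; rfl
    simp only [hfact, hmod2]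
    by_cases hpar : (m + 1) % 2 = 1
    · rw [if_pos (by rw [hpar]; rfl)]
      have hset : PySem.List.pySetD (pvOut p L m) ((m : Int) + 1) (pvModinv ((Nat.factorial (m + 1) : Int) % p) p)
          = pvOut p L (m + 1) := by
        have h1 : ((m : Int) + 1) = ((m + 1 : Nat) : Int) := by push_cast; ring
        rw [h1, PySem.List.pySetD_natCast]
        have h2 : pvModinv ((Nat.factorial (m + 1) : Int) % p) p
            = (Nat.factorial (m + 1) : Int) ^ (p - 2).toNat % p := by
          unfold pvModinv PySem.Int.powMod
          rw [PySem.Int.mod_eq_emod_of_pos (by omega), pvPowEmod]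
        rw [h2, pvOut_set_odd p L m hpar]
      rw [hset]
    · rw [if_neg (by intro h; apply hpar; exact_mod_cast h)]
      rw [pvOut_even p L m (by omega)]

lemma pvA_eq (N p : Int) (hp : 2 ≤ p) (hN : 0 ≤ N) :
    sinh_taylor_modp N p = pvOut p (N.toNat + 1) N.toNat := by
  unfold sinh_taylor_modp
  have h1 : N + 1 = ((N.toNat : Int)) + 1 := by omega
  rw [h1, PySem.List.pyRepeat_singleton]
  have h2 : (((N.toNat : Int)) + 1).toNat = N.toNat + 1 := by omega
  rw [h2, pvAloop p hp (N.toNat + 1) N.toNat (by omega)]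

lemma pvBloop (p : Int) (hp : 2 ≤ p) (L t : Nat) (h : 2 * t + 1 < L) :
    (((List.range t).map (fun (k : Nat) => (3 : Int) + 2 * (k : Int))).foldl
      (fun (st : List Int × Int) k =>
        let inv := PySem.Int.mod (st.2 * PySem.Int.powMod (k * (k - 1)) (p - 2).toNat p) p
        (PySem.List.pySetD st.1 k inv, inv))
      (pvOut p L 1, 1))
    = (pvOut p L (2 * t + 1), (Nat.factorial (2 * t + 1) : Int) ^ (p - 2).toNat % p) := by
  induction t with
  | zero =>
    rw [List.range_zero, List.map_nil, List.foldl_nil]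
    rw [show 2 * 0 + 1 = 1 by rfl, Nat.factorial_one, Nat.cast_one, one_pow,
      Int.emod_eq_of_lt (by norm_num) (by omega)]
  | succ t ih =>
    rw [List.range_succ, List.map_append, List.foldl_append, ih (by omega),
      List.map_cons, List.map_nil, List.foldl_cons, List.foldl_nil]
    have hinv : PySem.Int.mod ((Nat.factorial (2 * t + 1) : Int) ^ (p - 2).toNat % p *
          PySem.Int.powMod (((3 : Int) + 2 * t) * (((3 : Int) + 2 * t) - 1)) (p - 2).toNat p) p
        = (Nat.factorial (2 * (t + 1) + 1) : Int) ^ (p - 2).toNat % p := by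
      unfold PySem.Int.powMod
      rw [PySem.Int.mod_eq_emod_of_pos (by omega), PySem.Int.mod_eq_emod_of_pos (by omega), pvChain]
      congr 1
      have hnat : Nat.factorial (2 * (t + 1) + 1)
          = Nat.factorial (2 * t + 1) * ((2 * t + 1 + 1) * (2 * t + 1 + 1 + 1)) := by
        have e1 : 2 * (t + 1) + 1 = 2 * t + 1 + 1 + 1 := by ring
        rw [e1, Nat.factorial_succ (2 * t + 1 + 1), Nat.factorial_succ (2 * t + 1)]
        ring
      have hb : (Nat.factorial (2 * t + 1) : Int) * (((3 : Int) + 2 * t) * (((3 : Int) + 2 * t) - 1))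
          = (Nat.factorial (2 * (t + 1) + 1) : Int) := by
        rw [hnat]; push_cast; ring
      rw [hb]
    simp only [hinv]
    have hset : PySem.List.pySetD (pvOut p L (2 * t + 1)) ((3 : Int) + 2 * t)
          ((Nat.factorial (2 * (t + 1) + 1) : Int) ^ (p - 2).toNat % p)
        = pvOut p L (2 * (t + 1) + 1) := by
      have h1 : ((3 : Int) + 2 * t) = ((2 * t + 3 : Nat) : Int) := by push_cast; ring
      rw [h1, PySem.List.pySetD_natCast]
      have h2 : pvOut p L (2 * t + 1) = pvOut p L (2 * t + 2) := (pvOut_even p L (2 * t + 1) (by omega)).symm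
      have h3 : 2 * (t + 1) + 1 = (2 * t + 2) + 1 := by ring
      rw [h2, h3]
      have h4 : (2 * t + 3) = (2 * t + 2) + 1 := by ring
      rw [h4]
      exact pvOut_set_odd p L (2 * t + 2) (by omega)
    rw [hset]

lemma pvB_eq (N p : Int) (hp : 2 ≤ p) (hN : 1 ≤ N) :
    sinh_taylor_modp_alt N p = pvOut p (N.toNat + 1) N.toNat := by
  unfold sinh_taylor_modp_alt
  simp only [if_pos hN]
  have hL : N + 1 = ((N.toNat + 1 : Nat) : Int) := by omega
  rw [hL, PySem.List.pyRepeat_singleton, Int.toNat_natCast]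
  have hset1 : PySem.List.pySetD (List.replicate (N.toNat + 1) (0 : Int)) 1 1
      = pvOut p (N.toNat + 1) 1 := by
    rw [PySem.List.pySetD_of_nonneg _ _ (by decide)]
    exact pvOut_one p (N.toNat + 1) hp
  rw [hset1]
  set t : Nat := ((N - 1) / 2).toNat with ht
  have hrange : PySem.List.pyRange 3 (((N.toNat + 1 : Nat) : Int)) 2
      = (List.range t).map (fun (k : Nat) => (3 : Int) + 2 * (k : Int)) := by
    rw [PySem.List.pyRange_of_pos 3 (((N.toNat + 1 : Nat) : Int)) (by norm_num)]
    have hn : (if (3 : Int) < ((N.toNat + 1 : Nat) : Int)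
        then ((((N.toNat + 1 : Nat) : Int) - 3 + 2 - 1) / 2).toNat else 0) = t := by
      split_ifs with h3 <;> omega
    rw [hn]
  rw [hrange, pvBloop p hp (N.toNat + 1) t (by omega)]
  by_cases hodd : N.toNat % 2 = 1
  · have h5 : 2 * t + 1 = N.toNat := by omega
    rw [h5]
  · have h5 : N.toNat = 2 * t + 1 + 1 := by omega
    rw [h5]
    exact (pvOut_even p (2 * t + 1 + 1 + 1) (2 * t + 1) (by omega)).symm

lemma pvA_neg (N p : Int) (hN : N < 0) : sinh_taylor_modp N p = [] := by
  unfold sinh_taylor_modp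
  rw [PySem.List.pyRange_one_eq_nil (by omega), List.foldl_nil, PySem.List.pyRepeat_singleton]
  simp
  omega

lemma pvB_le_zero (N p : Int) (hN : N ≤ 0) :
    sinh_taylor_modp_alt N p = List.replicate (N + 1).toNat 0 := by
  unfold sinh_taylor_modp_alt
  simp only [if_neg (by omega : ¬ (1 : Int) ≤ N)]
  rw [PySem.List.pyRepeat_singleton]
  rw [PySem.List.pyRange_of_pos 3 (N + 1) (by norm_num), if_neg (by omega), List.range_zero,
    List.map_nil, List.foldl_nil]

-- ===== VERDICT (by name: the statement is the Claim_ definition above) =====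
theorem sinh_taylor_modp_spec : Claim_equal_sinh_taylor_modp := by
  intro N p _ hpre
  have hp : 2 ≤ p := hpre
  unfold Spec_sinh_taylor_modp
  by_cases hN : 1 ≤ N
  · rw [pvA_eq N p hp (by omega), pvB_eq N p hp hN]
  · by_cases hN0 : N = 0
    · subst hN0
      rw [pvA_eq 0 p hp le_rfl, pvB_le_zero 0 p le_rfl]
      show pvOut p 1 0 = List.replicate 1 0
      exact pvOut_zero p 1
    · rw [pvA_neg N p (by omega), pvB_le_zero N p (by omega)]
      have : (N + 1).toNat = 0 := by omega
      rw [this]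
      rfl
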